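-- pv_equiv track=rewrite | github.com/ElAwbery/MIT-6.00.2x | Week 1/powerset1.py | BigPowerSet
-- ===== SOURCE A (Python) =====
-- def BigPowerSet(items):
--
--     N = len(items)
--
--     for i in range (3**N):
--
--         list1 = []
--         list2 = []
--         combo = (list1, list2)
--         ternary = base_three(i, N)
--
--         # yields one result from N times round the inner for loop, like with the example generator
--         # uses ternary string indexing to access the bag number (0, 1, or 2)
--
--         for j in range(N):
--
--             if int(ternary[j]) == 1:
--
--                 list1.append(items[j])
--
--             if int(ternary[j]) == 2:
--                 list2.append(items[j])
--
--         combo = (list1, list2)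
--
--         yield combo # gives one of all possible combinations, each time round the outer for loop
--
-- def base_three(num, digits):
--     if digits == 0:
--         return ''
--     else:
--         return base_three(num//3, digits - 1) + str(num%3)
-- ===== SOURCE B (Python) =====
-- def BigPowerSet(items):
--     # Recursive three-way branching: for each item (front to back) either skip it,
--     # put it in list1, or put it in list2; branch order matches base-3 enumeration.
--     def go(rest, l1, l2):
--         if not rest:
--             yield (l1[:], l2[:])
--         else:
--             x = rest[0]
--             tail = rest[1:]
--             yield from go(tail, l1, l2)
--             l1.append(x)
--             yield from go(tail, l1, l2)
--             l1.pop()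
--             l2.append(x)
--             yield from go(tail, l1, l2)
--             l2.pop()
--     yield from go(list(items), [], [])
-- ===== Notes on version B (the rewrite author's own statement) =====
-- stated objective: alternative
-- what changed: Replaces the base-3 counter (enumerating 3^N indices, converting each to a ternary string and scanning it per index) by a direct recursive three-way branching over the items (skip / list1 / list2) with two accumulator lists.
import Mathlib
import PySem

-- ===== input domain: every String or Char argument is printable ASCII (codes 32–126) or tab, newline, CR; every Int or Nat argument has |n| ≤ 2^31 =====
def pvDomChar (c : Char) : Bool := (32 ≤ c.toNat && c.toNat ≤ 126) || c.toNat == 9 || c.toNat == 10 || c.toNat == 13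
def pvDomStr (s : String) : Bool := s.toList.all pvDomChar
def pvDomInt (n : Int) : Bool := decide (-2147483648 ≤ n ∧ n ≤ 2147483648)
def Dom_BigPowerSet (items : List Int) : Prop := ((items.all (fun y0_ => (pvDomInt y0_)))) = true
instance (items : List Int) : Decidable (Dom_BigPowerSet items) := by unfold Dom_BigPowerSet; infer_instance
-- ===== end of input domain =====

-- B replaces A's base-3 index counter with a recursive three-way branching over the items (alternative decomposition, same output order).

-- ===== PORT A =====
-- base_three(num, digits): digits is always len(items) (a Nat), so recursion on digits is the Python recursion
def baseThree (num : Int) : Nat → String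
  | 0 => ""
  | d + 1 => baseThree (PySem.Int.floordiv num 3) d ++ PySem.Int.toStr (PySem.Int.mod num 3)

-- body of the inner j-loop: the two sequential ifs; indices are always in range, so the pyGetD default 0 is never used
def stepA (items : List Int) (ternary : String) (combo : List Int × List Int) (j : Int) : List Int × List Int :=
  let d := (PySem.Str.pyGet? ternary j).bind (fun c => PySem.Int.ofChars? [c])
  let combo1 := if d = some 1 then (combo.1 ++ [PySem.List.pyGetD items j 0], combo.2) else combo
  if d = some 2 then (combo1.1, combo1.2 ++ [PySem.List.pyGetD items j 0]) else combo1

-- one iteration of the outer loop (one yielded combo)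
def rowA (items : List Int) (i : Int) : List Int × List Int :=
  (PySem.List.pyRange 0 (items.length : Int) 1).foldl (stepA items (baseThree i items.length)) ([], [])

def BigPowerSet (items : List Int) : List (List Int × List Int) :=
  (PySem.List.pyRange 0 ((3 : Int) ^ items.length) 1).map (rowA items)

-- ===== PORT B =====
def goAlt : List Int → List Int → List Int → List (List Int × List Int)
  | [], l1, l2 => [(l1, l2)]
  | x :: rest, l1, l2 =>
      goAlt rest l1 l2 ++ goAlt rest (l1 ++ [x]) l2 ++ goAlt rest l1 (l2 ++ [x])

def BigPowerSet_alt (items : List Int) : List (List Int × List Int) := goAlt items [] []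

-- ===== PRECONDITION & SPEC =====
def Spec_BigPowerSet (items : List Int) (out : List (List Int × List Int)) : Prop := out = BigPowerSet_alt items
instance (items : List Int) (out : List (List Int × List Int)) : Decidable (Spec_BigPowerSet items out) := by unfold Spec_BigPowerSet; infer_instance

-- ===== CLAIM (what is proved, stated in full; the proofs are below) =====
def Claim_equal_BigPowerSet : Prop := ∀ (items : List Int), Dom_BigPowerSet items → Spec_BigPowerSet items (BigPowerSet items)

-- ===== LEMMAS AND PROOFS =====

-- splitting off the most significant base-3 digit
theorem baseThree_split (n : Nat) : ∀ (d k : Int), 0 ≤ d → d < 3 → 0 ≤ k → k < 3 ^ n →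
    (baseThree (d * 3 ^ n + k) (n + 1)).toList
      = (PySem.Int.toStr d).toList ++ (baseThree k n).toList := by
  induction n with
  | zero =>
    intro d k hd0 hd3 hk0 hk3
    have hk : k = 0 := by norm_num at hk3; omega
    subst hk
    have he : d * 3 ^ 0 + 0 = d := by ring
    rw [he]
    have hmod : PySem.Int.mod d 3 = d := by
      rw [PySem.Int.mod_eq_emod_of_pos (by omega)]; omega
    rw [show baseThree d 1 = baseThree (PySem.Int.floordiv d 3) 0 ++ PySem.Int.toStr (PySem.Int.mod d 3) from rfl]
    rw [String.toList_append, hmod]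
    simp [baseThree]
  | succ n ih =>
    intro d k hd0 hd3 hk0 hk3
    have hP : (0:Int) < 3 ^ n := by positivity
    have hdiv : PySem.Int.floordiv (d * 3 ^ (n+1) + k) 3 = d * 3 ^ n + k / 3 := by
      rw [PySem.Int.floordiv_eq_ediv_of_pos (by omega)]
      have : d * 3 ^ (n+1) + k = (d * 3 ^ n) * 3 + k := by ring
      rw [this]; omega
    have hmod : PySem.Int.mod (d * 3 ^ (n+1) + k) 3 = k % 3 := by
      rw [PySem.Int.mod_eq_emod_of_pos (by omega)]
      have : d * 3 ^ (n+1) + k = (d * 3 ^ n) * 3 + k := by ring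
      rw [this]; omega
    have hdivk : PySem.Int.floordiv k 3 = k / 3 := PySem.Int.floordiv_eq_ediv_of_pos (by omega)
    have hmodk : PySem.Int.mod k 3 = k % 3 := PySem.Int.mod_eq_emod_of_pos (by omega)
    have hk3' : k < 3 ^ (n+1) := hk3
    have hlt : k / 3 < 3 ^ n := by
      have : k < 3 * 3 ^ n := by rw [pow_succ] at hk3'; omega
      omega
    show (baseThree (d * 3 ^ (n+1) + k) ((n+1) + 1)).toList = _
    rw [show baseThree (d * 3 ^ (n+1) + k) ((n+1) + 1)
          = baseThree (PySem.Int.floordiv (d * 3 ^ (n+1) + k) 3) (n+1)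
            ++ PySem.Int.toStr (PySem.Int.mod (d * 3 ^ (n+1) + k) 3) from rfl]
    rw [show baseThree k (n+1)
          = baseThree (PySem.Int.floordiv k 3) n ++ PySem.Int.toStr (PySem.Int.mod k 3) from rfl]
    rw [String.toList_append, String.toList_append, hdiv, hmod, hdivk, hmodk,
        ih d (k / 3) hd0 hd3 (by omega) hlt]
    simp [List.append_assoc]

-- a single step only appends to the two components
theorem stepA_append (items : List Int) (t : String) (p : List Int × List Int) (j : Int) :
    stepA items t p j = (p.1 ++ (stepA items t ([], []) j).1, p.2 ++ (stepA items t ([], []) j).2) := by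
  simp only [stepA]
  split_ifs <;> simp_all

-- folding from (a,b) just prefixes the result of folding from ([],[])
theorem foldl_stepA_append (items : List Int) (t : String) (L : List Int) :
    ∀ (a b : List Int), L.foldl (stepA items t) (a, b)
      = (a ++ (L.foldl (stepA items t) ([], [])).1, b ++ (L.foldl (stepA items t) ([], [])).2) := by
  induction L with
  | nil => intro a b; simp
  | cons j L ih =>
    intro a b
    simp only [List.foldl_cons]
    rcases hs : stepA items t ([], []) j with ⟨u, w⟩
    rw [stepA_append items t (a, b) j, hs, ih, ih u w]
    simp [List.append_assoc]

-- shifting the j-loop by one position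
theorem foldl_stepA_shift (x : Int) (rest : List Int) (tern tern' : String) (c : Char)
    (h : tern.toList = c :: tern'.toList) (init : List Int × List Int) :
    (PySem.List.pyRange 1 ((rest.length : Int) + 1) 1).foldl (stepA (x :: rest) tern) init
      = (PySem.List.pyRange 0 (rest.length : Int) 1).foldl (stepA rest tern') init := by
  have hstep : ∀ (acc : List Int × List Int) (k : Nat),
      stepA (x :: rest) tern acc (1 + (k : Int)) = stepA rest tern' acc (0 + (k : Int)) := by
    intro acc k
    have h1 : (1 + (k : Int)) = ((k + 1 : Nat) : Int) := by omega
    have h0 : (0 + (k : Int)) = ((k : Nat) : Int) := by omega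
    simp only [stepA, h1, h0, PySem.Str.pyGet?_natCast, PySem.List.pyGetD_natCast, h]
    simp
  rw [PySem.List.pyRange_one, PySem.List.pyRange_one]
  have hl1 : (((rest.length : Int) + 1) - 1).toNat = rest.length := by omega
  have hl2 : ((rest.length : Int) - 0).toNat = rest.length := by omega
  rw [hl1, hl2]
  simp only [List.foldl_map]
  exact PySem.List.foldl_congr_mem _ _ _ _ (fun acc k _ => hstep acc k)

-- goAlt with accumulators = goAlt from empty, prefixed
theorem goAlt_append (rest : List Int) :
    ∀ (l1 l2 : List Int), goAlt rest l1 l2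
      = (goAlt rest [] []).map (fun p => (l1 ++ p.1, l2 ++ p.2)) := by
  induction rest with
  | nil => intro l1 l2; simp [goAlt]
  | cons x r ih =>
    intro l1 l2
    simp only [goAlt, List.map_append]
    rw [ih l1 l2, ih (l1 ++ [x]) l2, ih l1 (l2 ++ [x]),
        ih [] [], ih ([] ++ [x]) [], ih [] ([] ++ [x])]
    simp [List.map_map, Function.comp_def, List.append_assoc]


-- peeling the first item / most significant digit off one row
theorem row_core (x : Int) (rest : List Int) (i k : Int) (c : Char)
    (hc : (baseThree i (rest.length + 1)).toList = c :: (baseThree k rest.length).toList) :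
    rowA (x :: rest) i
      = ((stepA (x :: rest) (baseThree i (rest.length + 1)) ([], []) 0).1 ++ (rowA rest k).1,
         (stepA (x :: rest) (baseThree i (rest.length + 1)) ([], []) 0).2 ++ (rowA rest k).2) := by
  show (PySem.List.pyRange 0 ((x :: rest).length : Int) 1).foldl
      (stepA (x :: rest) (baseThree i (x :: rest).length)) ([], []) = _
  have hlen : (((x :: rest).length : Int)) = (rest.length : Int) + 1 := by push_cast [List.length_cons]; ring
  have hlen2 : (x :: rest).length = rest.length + 1 := by simp
  rw [hlen, hlen2]
  rw [PySem.List.pyRange_one_cons (by omega)]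
  simp only [List.foldl_cons, zero_add]
  rw [foldl_stepA_shift x rest _ (baseThree k rest.length) c hc]
  rw [foldl_stepA_append]
  rfl

-- the three digit cases of one row
theorem row_split (x : Int) (rest : List Int) (d k : Int) (hd0 : 0 ≤ d) (hd3 : d < 3)
    (hk0 : 0 ≤ k) (hk : k < 3 ^ rest.length) :
    rowA (x :: rest) (d * 3 ^ rest.length + k)
      = (if d = 1 then (x :: (rowA rest k).1, (rowA rest k).2)
         else if d = 2 then ((rowA rest k).1, x :: (rowA rest k).2)
         else rowA rest k) := by
  have hsplit := baseThree_split rest.length d k hd0 hd3 hk0 hk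
  interval_cases d
  · rw [show (0 : Int) * 3 ^ rest.length + k = k from by ring] at hsplit ⊢
    have hc : (baseThree k (rest.length + 1)).toList = '0' :: (baseThree k rest.length).toList := by
      rw [hsplit]; rfl
    rw [row_core x rest k k '0' hc]
    simp [stepA, hc, show PySem.Int.ofChars? ['0'] = some 0 from by decide]
  · rw [show (1 : Int) * 3 ^ rest.length + k = 3 ^ rest.length + k from by ring] at hsplit ⊢
    have hc : (baseThree (3 ^ rest.length + k) (rest.length + 1)).toList
        = '1' :: (baseThree k rest.length).toList := by
      rw [hsplit]; rfl
    rw [row_core x rest (3 ^ rest.length + k) k '1' hc]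
    simp [stepA, hc, show PySem.Int.ofChars? ['1'] = some 1 from by decide,
          PySem.List.pyGetD_zero_cons]
  · rw [show (2 : Int) * 3 ^ rest.length + k = 2 * 3 ^ rest.length + k from by ring] at hsplit ⊢
    have hc : (baseThree (2 * 3 ^ rest.length + k) (rest.length + 1)).toList
        = '2' :: (baseThree k rest.length).toList := by
      rw [hsplit]; rfl
    rw [row_core x rest (2 * 3 ^ rest.length + k) k '2' hc]
    simp [stepA, hc, show PySem.Int.ofChars? ['2'] = some 2 from by decide,
          PySem.List.pyGetD_zero_cons]

-- one block of indices [d*3^n, (d+1)*3^n) maps to a prefixed copy of BigPowerSet rest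
theorem block_eq (x : Int) (rest : List Int) (d : Int) (hd0 : 0 ≤ d) (hd3 : d < 3) :
    (PySem.List.pyRange (d * 3 ^ rest.length) ((d + 1) * 3 ^ rest.length) 1).map (rowA (x :: rest))
      = (BigPowerSet rest).map
          (fun p => if d = 1 then (x :: p.1, p.2) else if d = 2 then (p.1, x :: p.2) else p) := by
  have hP : (0 : Int) < 3 ^ rest.length := by positivity
  simp only [BigPowerSet]
  rw [PySem.List.pyRange_one, PySem.List.pyRange_one]
  have h1 : ((d + 1) * 3 ^ rest.length - d * 3 ^ rest.length) = (3 : Int) ^ rest.length := by ring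
  have h2 : ((3 : Int) ^ rest.length - 0) = (3 : Int) ^ rest.length := by ring
  rw [h1, h2]
  simp only [List.map_map]
  apply List.map_congr_left
  intro a ha
  have hal : a < ((3 : Int) ^ rest.length).toNat := List.mem_range.mp ha
  have hai : (a : Int) < 3 ^ rest.length := by
    have := Int.toNat_of_nonneg hP.le
    omega
  simp only [Function.comp_apply, zero_add]
  rw [row_split x rest d (a : Int) hd0 hd3 (by positivity) hai]

theorem main_eq (items : List Int) : BigPowerSet items = goAlt items [] [] := by
  induction items with
  | nil => decide
  | cons x rest ih =>
    have hP : (0 : Int) < 3 ^ rest.length := by positivity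
    show (PySem.List.pyRange 0 ((3 : Int) ^ (x :: rest).length) 1).map (rowA (x :: rest)) = _
    have hlen : (3 : Int) ^ (x :: rest).length = 3 * 3 ^ rest.length := by
      rw [show (x :: rest).length = rest.length + 1 from by simp, pow_succ]; ring
    rw [hlen]
    rw [PySem.List.pyRange_one_append 0 (3 ^ rest.length) (3 * 3 ^ rest.length) (by omega) (by omega),
        PySem.List.pyRange_one_append (3 ^ rest.length) (2 * 3 ^ rest.length) (3 * 3 ^ rest.length)
          (by omega) (by omega)]
    simp only [List.map_append]
    have b0 := block_eq x rest 0 (by omega) (by omega)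
    have b1 := block_eq x rest 1 (by omega) (by omega)
    have b2 := block_eq x rest 2 (by omega) (by omega)
    norm_num at b0 b1 b2
    rw [b0, b1, b2, ih]
    show _ = goAlt rest [] [] ++ goAlt rest ([] ++ [x]) [] ++ goAlt rest [] ([] ++ [x])
    rw [goAlt_append rest ([] ++ [x]) [], goAlt_append rest [] ([] ++ [x])]
    simp

-- ===== VERDICT (by name: the statement is the Claim_ definition above) =====
theorem BigPowerSet_spec : Claim_equal_BigPowerSet := by
  intro items _
  unfold Spec_BigPowerSet BigPowerSet_alt
  exact main_eq items
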